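-- pv_equiv track=rewrite | github.com/JavierNancoB/Rubrika-docx | Analisis v1 Metricas Sintaxicas/functions.py | count_paragraphs
-- ===== SOURCE A (Python) =====
-- def count_paragraphs(doc):
--     # Normalizar saltos de línea y retornos de carro
--     doc = doc.replace('\r\n', '\n').replace('\r', '\n')
--     # Divide el documento en líneas
--     lines = doc.split('\n')
--     paragraphs = []
--     current_paragraph = []
--
--     for line in lines:
--         # Si la línea no está vacía, agrégala al párrafo actual
--         if line.strip():
--             current_paragraph.append(line.strip())
--         # Si la línea está vacía y hay contenido en el párrafo actual, finaliza el párrafo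
--         elif current_paragraph:
--             paragraphs.append(" ".join(current_paragraph))
--             current_paragraph = []
--
--     # Agrega el último párrafo si existe
--     if current_paragraph:
--         paragraphs.append(" ".join(current_paragraph))
--
--     return len(paragraphs)
-- ===== SOURCE B (Python) =====
-- def count_paragraphs(doc):
--     # Same normalization and line split as the original, but count paragraph
--     # *starts* (blank->nonblank transitions) instead of building paragraph strings.
--     doc = doc.replace('\r\n', '\n').replace('\r', '\n')
--     count = 0
--     prev_blank = True
--     for line in doc.split('\n'):
--         blank = not line.strip()
--         if prev_blank and not blank:
--             count += 1
--         prev_blank = blank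
--     return count
-- ===== Notes on version B (the rewrite author's own statement) =====
-- stated objective: simpler
-- what changed: B counts blank-to-nonblank transitions with a single counter and flag instead of accumulating stripped lines into paragraph lists, joining them and taking the length.
import Mathlib
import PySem

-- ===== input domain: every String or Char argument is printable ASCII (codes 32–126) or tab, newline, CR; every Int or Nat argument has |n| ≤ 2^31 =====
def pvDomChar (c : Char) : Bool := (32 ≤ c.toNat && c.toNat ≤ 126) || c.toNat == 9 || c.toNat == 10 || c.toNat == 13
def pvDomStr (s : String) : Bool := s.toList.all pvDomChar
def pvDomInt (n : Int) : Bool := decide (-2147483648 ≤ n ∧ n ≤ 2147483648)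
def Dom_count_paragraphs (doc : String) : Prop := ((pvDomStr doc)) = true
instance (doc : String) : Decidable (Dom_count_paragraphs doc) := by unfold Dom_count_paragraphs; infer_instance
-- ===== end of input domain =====

-- B counts blank-to-nonblank transitions with a counter and flag instead of building paragraph lists and joining them (simpler decomposition, same O(n) cost).


-- ===== PORT A =====
-- A's loop body: build (paragraphs, current_paragraph); strings ported on List Char via PySem.Chars (exact)
def cpStepA (st : List (List Char) × List (List Char)) (line : List Char) :
    List (List Char) × List (List Char) :=
  if PySem.Chars.strip line ≠ [] then (st.1, st.2 ++ [PySem.Chars.strip line])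
  else if st.2 ≠ [] then (st.1 ++ [PySem.Chars.join [' '] st.2], [])
  else st

def count_paragraphs (doc : String) : Int :=
  let d := PySem.Chars.replace (PySem.Chars.replace doc.toList ['\r', '\n'] ['\n']) ['\r'] ['\n']
  let lines := PySem.Chars.splitOn d ['\n']
  let st := lines.foldl cpStepA ([], [])
  let paragraphs := if st.2 ≠ [] then st.1 ++ [PySem.Chars.join [' '] st.2] else st.1
  (paragraphs.length : Int)

-- ===== PORT B =====
-- B's loop body: state (count, prev_blank)
def cpStepB (st : Int × Bool) (line : List Char) : Int × Bool :=
  let blank := PySem.Chars.strip line == ([] : List Char)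
  (if st.2 && !blank then st.1 + 1 else st.1, blank)

def count_paragraphs_alt (doc : String) : Int :=
  let d := PySem.Chars.replace (PySem.Chars.replace doc.toList ['\r', '\n'] ['\n']) ['\r'] ['\n']
  ((PySem.Chars.splitOn d ['\n']).foldl cpStepB (0, true)).1

-- ===== PRECONDITION & SPEC =====
def Spec_count_paragraphs (doc : String) (out : Int) : Prop := out = count_paragraphs_alt doc
instance (doc : String) (out : Int) : Decidable (Spec_count_paragraphs doc out) := by unfold Spec_count_paragraphs; infer_instance

-- ===== CLAIM (what is proved, stated in full; the proofs are below) =====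
def Claim_equal_count_paragraphs : Prop := ∀ (doc : String), Dom_count_paragraphs doc → Spec_count_paragraphs doc (count_paragraphs doc)

-- ===== LEMMAS AND PROOFS =====
-- Loop invariant: B's counter equals A's paragraphs-so-far plus one for a pending
-- current paragraph, and B's prev_blank flag equals "current paragraph is empty".
lemma cp_inv (lines : List (List Char)) (paras cur : List (List Char)) (count : Int)
    (h : count = paras.length + (if cur = [] then 0 else 1)) :
    ((fun st : List (List Char) × List (List Char) =>
        ((if st.2 ≠ [] then st.1 ++ [PySem.Chars.join [' '] st.2] else st.1).length : Int))
      (lines.foldl cpStepA (paras, cur)))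
    = (lines.foldl cpStepB (count, cur == [])).1 := by
  induction lines generalizing paras cur count with
  | nil =>
    simp only [List.foldl_nil]
    split_ifs with hc
    · simp only [List.length_append, List.length_singleton]
      simp [h, if_neg hc]
    · simp at hc; simp [h, hc]
  | cons line rest ih =>
    simp only [List.foldl_cons]
    by_cases hs : PySem.Chars.strip line = []
    · by_cases hc : cur = []
      · have e1 : cpStepA (paras, cur) line = (paras, cur) := by
          simp [cpStepA, hs, hc]
        have e2 : cpStepB (count, cur == []) line = (count, true) := by
          simp [cpStepB, hs]
        rw [e1, e2]
        have := ih paras cur count h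
        simpa [hc] using this
      · have e1 : cpStepA (paras, cur) line
            = (paras ++ [PySem.Chars.join [' '] cur], ([] : List (List Char))) := by
          simp [cpStepA, hs, hc]
        have e2 : cpStepB (count, cur == []) line = (count, true) := by
          simp [cpStepB, hs]
        rw [e1, e2]
        have := ih (paras ++ [PySem.Chars.join [' '] cur]) [] count
          (by simp [h, hc])
        simpa using this
    · have e1 : cpStepA (paras, cur) line = (paras, cur ++ [PySem.Chars.strip line]) := by
        simp [cpStepA, hs]
      rw [e1]
      have hne : ((cur ++ [PySem.Chars.strip line]) == ([] : List (List Char))) = false := by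
        simp
      by_cases hc : cur = []
      · have e2 : cpStepB (count, cur == []) line = (count + 1, false) := by
          simp [cpStepB, hs, hc]
        rw [e2]
        have := ih paras (cur ++ [PySem.Chars.strip line]) (count + 1)
          (by subst hc; simp [h])
        rw [hne] at this
        exact this
      · have e2 : cpStepB (count, cur == []) line = (count, false) := by
          simp [cpStepB, hs, hc]
        rw [e2]
        have := ih paras (cur ++ [PySem.Chars.strip line]) count
          (by simp [h, hc])
        rw [hne] at this
        exact this

-- ===== VERDICT (by name: the statement is the Claim_ definition above) =====
theorem count_paragraphs_spec : Claim_equal_count_paragraphs := by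
  intro doc _
  unfold Spec_count_paragraphs count_paragraphs count_paragraphs_alt
  exact cp_inv _ [] [] 0 (by simp)
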